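-- pv_equiv track=rewrite | github.com/tblock96/CSC180-UofT | Project3Synonyms/synonyms1.py | get_other_words
-- ===== SOURCE A (Python) =====
-- def get_other_words(word, sentence):
--     '''Return a dictionary of the number of times each other word appears in the
--     sentence
--
--     word - the given word
--     sentence - a list of words'''
--     d = {}
--     for w in sentence:
--         if w == word:
--             continue
--         elif w not in list(d.keys()):
--             d[w] = 1
--         else:
--             d[w] += 1
--     return d
-- ===== SOURCE B (Python) =====
-- def get_other_words(word, sentence):
--     '''Return a dictionary of the number of times each other word appears in the
--     sentence
--
--     word - the given word
--     sentence - a list of words'''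
--     return {w: sentence.count(w) for w in dict.fromkeys(sentence) if w != word}
-- ===== Notes on version B (the rewrite author's own statement) =====
-- stated objective: idiomatic
-- what changed: Replaces A's single accumulating dict pass (membership test, insert-or-increment) with a one-line dict comprehension over the distinct words (dict.fromkeys order) that counts each other word by rescanning the sentence with sentence.count.
import Mathlib
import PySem

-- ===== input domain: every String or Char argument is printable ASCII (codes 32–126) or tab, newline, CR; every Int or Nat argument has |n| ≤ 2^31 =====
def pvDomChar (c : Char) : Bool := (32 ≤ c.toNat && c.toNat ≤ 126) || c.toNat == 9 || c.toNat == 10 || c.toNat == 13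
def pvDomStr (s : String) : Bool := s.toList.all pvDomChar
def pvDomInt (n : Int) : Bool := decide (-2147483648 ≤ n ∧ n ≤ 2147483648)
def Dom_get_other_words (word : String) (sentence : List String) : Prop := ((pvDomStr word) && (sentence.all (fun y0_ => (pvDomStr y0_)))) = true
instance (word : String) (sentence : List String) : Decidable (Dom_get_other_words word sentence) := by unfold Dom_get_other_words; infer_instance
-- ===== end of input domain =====

-- ===== PORT A =====
-- A: one accumulating pass over `sentence`, keeping a dict of counts
-- (skip `word`; first occurrence inserts 1, later ones increment).
def get_other_words (word : String) (sentence : List String) : List (String × Int) :=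
  (sentence.foldl (fun d w =>
      if w == word then d
      else if !(PySem.Dict.contains d w) then d.insert w 1
      else d.modify w 0 (· + 1))
    PySem.Dict.empty).items

-- ===== PORT B =====
-- B: distinct words in first-occurrence order (dict.fromkeys), drop `word`,
-- and count each remaining word by rescanning the whole sentence.
def get_other_words_alt (word : String) (sentence : List String) : List (String × Int) :=
  ((PySem.List.dedup sentence).filter (fun w => w != word)).map
    (fun w => (w, (sentence.count w : Int)))

-- ===== PRECONDITION & SPEC =====
def Spec_get_other_words (word : String) (sentence : List String) (out : List (String × Int)) : Prop := out = get_other_words_alt word sentence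
instance (word : String) (sentence : List String) (out : List (String × Int)) : Decidable (Spec_get_other_words word sentence out) := by unfold Spec_get_other_words; infer_instance

-- ===== CLAIM (what is proved, stated in full; the proofs are below) =====
def Claim_equal_get_other_words : Prop := ∀ (word : String) (sentence : List String), Dom_get_other_words word sentence → Spec_get_other_words word sentence (get_other_words word sentence)

-- ===== LEMMAS AND PROOFS =====

-- set(filter) = filter(set): dedup commutes with filtering.
theorem gow_ofList_filter (p : String → Bool) (l : List String) :
    PySem.Set.ofList (l.filter p) = (PySem.Set.ofList l).filter p := by
  induction l using List.reverseRecOn with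
  | nil => rfl
  | append_singleton t x ih =>
    rw [List.filter_append, PySem.Set.ofList_eq_foldl, PySem.Set.ofList_eq_foldl,
        List.foldl_append, List.foldl_append, ← PySem.Set.ofList_eq_foldl,
        ← PySem.Set.ofList_eq_foldl]
    by_cases h : p x
    · simp only [List.filter_cons, h, List.filter_nil, List.foldl_cons, List.foldl_nil]
      simp only [PySem.Set.add, PySem.Set.contains, List.contains_eq_mem,
        PySem.Set.mem_ofList, decide_eq_true_eq]
      by_cases hm : x ∈ t
      · simp [hm, h, ih]
      · simp [hm, h, ih, List.filter_append]
    · simp only [List.filter_cons, h, List.filter_nil, List.foldl_nil, List.foldl_cons]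
      simp only [PySem.Set.add, PySem.Set.contains, List.contains_eq_mem, PySem.Set.mem_ofList]
      by_cases hm : x ∈ t
      · simp [hm, ih]
      · simp [hm, ih, List.filter_append, h]

-- inserting 1 at a fresh key is the same dict as modify with default 0.
theorem gow_insert_one_eq_modify (d : PySem.Dict String Int) (w : String)
    (h : d.contains w = false) : d.insert w 1 = d.modify w 0 (· + 1) := by
  simp [PySem.Dict.modify, PySem.Dict.getD_of_not_contains, h]

-- folding over a filtered list = folding with the test inside the step.
theorem gow_foldl_filter (p : String → Bool)
    (f : PySem.Dict String Int → String → PySem.Dict String Int)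
    (s : List String) (d : PySem.Dict String Int) :
    (s.filter p).foldl f d = s.foldl (fun d w => if p w then f d w else d) d := by
  induction s generalizing d with
  | nil => rfl
  | cons x t ih => by_cases h : p x <;> simp [h, ih]

-- A's accumulated dict IS Counter(sentence without word).
theorem gow_foldA_eq_counter (word : String) (sentence : List String) :
    sentence.foldl (fun d w =>
        if w == word then d
        else if !(PySem.Dict.contains d w) then d.insert w 1
        else d.modify w 0 (· + 1)) PySem.Dict.empty
      = PySem.Dict.counter (sentence.filter (fun w => w != word)) := by
  rw [PySem.Dict.counter_eq_foldl, gow_foldl_filter]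
  apply PySem.List.foldl_congr_mem
  intro d w _
  by_cases hw : w = word
  · simp [hw]
  · by_cases hc : PySem.Dict.contains d w
    · simp [hw, hc]
    · simp only [beq_iff_eq, hw, bne_iff_ne, ne_eq, not_false_eq_true, if_pos,
        Bool.not_eq_true] at *
      simp [hc, gow_insert_one_eq_modify d w (by simpa using hc)]

-- ===== VERDICT (by name: the statement is the Claim_ definition above) =====
theorem get_other_words_spec : Claim_equal_get_other_words := by
  intro word sentence _
  unfold Spec_get_other_words get_other_words get_other_words_alt
  rw [gow_foldA_eq_counter, PySem.Dict.items_counter, PySem.List.dedup_eq_ofList,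
      ← gow_ofList_filter]
  apply List.map_congr_left
  intro w hw
  have hmem := (PySem.Set.mem_ofList _ _).1 hw
  have hp : (w != word) = true := (List.mem_filter.1 hmem).2
  simp [List.count_filter, hp]
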